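-- pv_equiv track=rewrite | github.com/chairulridjaal/cs50-ai | tictactoe.py | checkAntidiagonal
-- ===== SOURCE A (Python) =====
-- def checkAntidiagonal(board, player):
--     count = 0
--     for row in range(len(board)):
--         for col in range(len(board)):
--             if (len(board) - row - 1) == col and board[row][col] == player:
--                 count += 1
--     if count == 3:
--         return True
--     else:
--         return False
-- ===== SOURCE B (Python) =====
-- def checkAntidiagonal(board, player):
--     diag = [row[len(board) - 1 - i] for i, row in enumerate(board)]
--     return diag.count(player) == 3
-- ===== Notes on version B (the rewrite author's own statement) =====
-- stated objective: faster
-- what changed: Replaces A's nested scan over all (row, col) pairs, which filters for col == n-row-1 while incrementing a counter, by extracting the antidiagonal as a list comprehension over enumerate(board) and testing diag.count(player) == 3 (the literal 3 test is preserved on purpose).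
import Mathlib
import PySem

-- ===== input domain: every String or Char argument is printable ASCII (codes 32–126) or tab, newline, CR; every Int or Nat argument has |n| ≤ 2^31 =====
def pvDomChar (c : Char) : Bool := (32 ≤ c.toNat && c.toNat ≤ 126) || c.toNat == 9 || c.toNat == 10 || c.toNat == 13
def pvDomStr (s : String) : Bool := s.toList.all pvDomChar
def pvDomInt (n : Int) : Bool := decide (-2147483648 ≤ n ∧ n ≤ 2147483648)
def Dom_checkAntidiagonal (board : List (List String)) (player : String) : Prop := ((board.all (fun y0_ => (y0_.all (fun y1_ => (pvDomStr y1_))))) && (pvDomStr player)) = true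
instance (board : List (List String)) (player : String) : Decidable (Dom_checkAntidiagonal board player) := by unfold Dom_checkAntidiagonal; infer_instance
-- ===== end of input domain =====

-- B replaces A's nested counting scan over all (row, col) pairs by extracting the antidiagonal
-- as a list and counting the player's occurrences in it (keeps the literal count == 3 test).

-- ===== PORT A =====
-- Python's `board[row][col]` is ported as an Option lookup; under Pre_ it is always `some`.
def checkAntidiagonal (board : List (List String)) (player : String) : Bool :=
  let n : Int := board.length
  let count : Int :=
    (PySem.List.pyRange 0 n 1).foldl (fun c row =>
      (PySem.List.pyRange 0 n 1).foldl (fun c col =>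
        if (n - row - 1) == col && ((PySem.List.pyGet? board row).bind (fun r => PySem.List.pyGet? r col) == some player)
        then c + 1 else c) c) 0
  if count == 3 then true else false

-- ===== PORT B =====
-- `[row[len(board)-1-i] for i, row in enumerate(board)]` then `diag.count(player) == 3`.
def checkAntidiagonal_alt (board : List (List String)) (player : String) : Bool :=
  let diag : List (Option String) :=
    (PySem.List.enumerate board 0).map (fun p => PySem.List.pyGet? p.2 ((board.length : Int) - 1 - p.1))
  diag.count (some player) == 3

-- ===== PRECONDITION & SPEC =====
-- Pre_ excludes exactly the ragged boards on which the Python A raises IndexError at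
-- board[row][n-1-row] (a row too short to hold its antidiagonal cell).
def Pre_checkAntidiagonal (board : List (List String)) (player : String) : Prop :=
  ∀ i : Nat, i < board.length → board.length - 1 - i < (board.getD i []).length
instance (board : List (List String)) (player : String) : Decidable (Pre_checkAntidiagonal board player) := by unfold Pre_checkAntidiagonal; infer_instance
def pvWitness_checkAntidiagonal : List (List String) × String :=
  ([["O", "O", "X"], ["O", "X", "O"], ["X", "O", "O"]], "X")

def Spec_checkAntidiagonal (board : List (List String)) (player : String) (out : Bool) : Prop := out = checkAntidiagonal_alt board player
instance (board : List (List String)) (player : String) (out : Bool) : Decidable (Spec_checkAntidiagonal board player out) := by unfold Spec_checkAntidiagonal; infer_instance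

-- ===== CLAIM (what is proved, stated in full; the proofs are below) =====
def Claim_equal_checkAntidiagonal : Prop := ∀ (board : List (List String)) (player : String), Dom_checkAntidiagonal board player → Pre_checkAntidiagonal board player → Spec_checkAntidiagonal board player (checkAntidiagonal board player)

-- ===== LEMMAS AND PROOFS =====

-- Counting a predicate of the shape `t == x && q x` over a nodup list containing t.
lemma countP_single {l : List Int} (t : Int) (q : Int → Bool) (hnd : l.Nodup) (ht : t ∈ l) :
    l.countP (fun x => t == x && q x) = if q t then 1 else 0 := by
  induction l with
  | nil => cases ht
  | cons a l ih =>
    rcases List.mem_cons.mp ht with rfl | hmem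
    · have hz : l.countP (fun x => t == x && q x) = 0 := by
        apply List.countP_eq_zero.mpr
        intro x hx
        have : t ≠ x := fun h => (List.nodup_cons.mp hnd).1 (h ▸ hx)
        simp [this]
      rw [List.countP_cons, hz]
      simp
    · have hne : a ≠ t := fun h => (List.nodup_cons.mp hnd).1 (h ▸ hmem)
      rw [List.countP_cons, ih (List.nodup_cons.mp hnd).2 hmem]
      simp [Ne.symm hne]

-- A's inner loop over all columns adds 1 exactly when the single antidiagonal column matches.
lemma inner_loop_eq (board : List (List String)) (player : String) (n row c : Int)
    (h0 : 0 ≤ row) (h1 : row < n) :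
    (PySem.List.pyRange 0 n 1).foldl (fun c col =>
        if (n - row - 1) == col && ((PySem.List.pyGet? board row).bind (fun r => PySem.List.pyGet? r col) == some player)
        then c + 1 else c) c
    = if (PySem.List.pyGet? board row).bind (fun r => PySem.List.pyGet? r (n - 1 - row)) == some player
      then c + 1 else c := by
  rw [PySem.List.foldl_count_if]
  rw [countP_single (n - row - 1)
        (fun col => (PySem.List.pyGet? board row).bind (fun r => PySem.List.pyGet? r col) == some player)
        (PySem.List.nodup_pyRange_one 0 n)
        (PySem.List.mem_pyRange_one.mpr ⟨by omega, by omega⟩)]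
  have : n - row - 1 = n - 1 - row := by ring
  rw [this]
  split_ifs <;> simp

-- ===== VERDICT (by name: the statement is the Claim_ definition above) =====
theorem checkAntidiagonal_spec : Claim_equal_checkAntidiagonal := by
  intro board player _ _
  unfold Spec_checkAntidiagonal checkAntidiagonal checkAntidiagonal_alt
  simp only []
  -- A's double loop collapses to a per-row match count over pyRange
  have houter :
      (PySem.List.pyRange 0 (board.length : Int) 1).foldl (fun c row =>
        (PySem.List.pyRange 0 (board.length : Int) 1).foldl (fun c col =>
          if ((board.length : Int) - row - 1) == col && ((PySem.List.pyGet? board row).bind (fun r => PySem.List.pyGet? r col) == some player)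
          then c + 1 else c) c) (0 : Int)
      = (PySem.List.pyRange 0 (board.length : Int) 1).foldl (fun c i =>
          if (PySem.List.pyGet? board i).bind (fun r => PySem.List.pyGet? r ((board.length : Int) - 1 - i)) == some player
          then c + 1 else c) (0 : Int) := by
    apply PySem.List.foldl_congr_mem
    intro c row hrow
    obtain ⟨h0, h1⟩ := PySem.List.mem_pyRange_one.mp hrow
    exact inner_loop_eq board player _ row c h0 h1
  rw [houter, PySem.List.foldl_if_add_one]
  -- B's diag over enumerate equals the same map over pyRange
  have hdiag :
      ((PySem.List.enumerate board 0).map (fun p => PySem.List.pyGet? p.2 ((board.length : Int) - 1 - p.1))).count (some player)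
      = (PySem.List.pyRange 0 (board.length : Int) 1).countP
          (fun i => (PySem.List.pyGet? board i).bind (fun r => PySem.List.pyGet? r ((board.length : Int) - 1 - i)) == some player) := by
    rw [PySem.List.enumerate_eq_map_pyRange (d := []), List.map_map, List.count_eq_countP, List.countP_map]
    apply List.countP_congr
    intro i hi
    obtain ⟨h0, h1⟩ := PySem.List.mem_pyRange_one.mp hi
    rw [PySem.List.len_eq] at h1
    have hlt : i.toNat < board.length := by omega
    have hget : PySem.List.pyGet? board i = some (PySem.List.pyGetD board i []) := by
      rw [PySem.List.pyGet?_of_nonneg board h0, PySem.List.pyGetD_of_nonneg board ([] : List String) h0]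
      simp [List.getD, hlt]
    simp [Function.comp, hget]
  rw [hdiag]
  split_ifs with h <;> simp_all <;> omega
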